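-- pv_equiv track=rewrite | github.com/StopSoo/PS | Programmers/Lv.2/Py/지게차와크레인.py | solution
-- ===== SOURCE A (Python) =====
-- from collections import deque
--
-- def solution(storage, requests):
--   n, m = len(storage), len(storage[0]) # 행, 열의 수
--   # 패딩 추가: 외부를 -1로 표시
--   new_sto = [[-1] * (m + 2)]
--   for row in storage:
--     new_sto.append([-1] + list(row) + [-1])
--   new_sto.append([-1] * (m + 2))
--
--   count = n * m  # 남은 컨테이너 수
--
--   for req in requests:
--     if len(req) == 1:  # 지게차
--       for i in range(1, n + 1):
--         for j in range(1, m + 1):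
--           if new_sto[i][j] == req:
--             for dy, dx in [(-1,0), (1,0), (0,-1), (0,1)]:
--               if new_sto[i+dy][j+dx] == -1:  # 외부와 접해 있으면 제거
--                 new_sto[i][j] = 0
--                 count -= 1
--                 break
--     else:  # 크레인
--       for i in range(1, n + 1):
--         for j in range(1, m + 1):
--           if new_sto[i][j] == req[0]:
--             new_sto[i][j] = 0
--             count -= 1
--     # BFS로 외부 공기(-1) 확산
--     H, W = n + 2, m + 2
--     visited = [[False] * W for _ in range(H)] # 방문 배열 쓰세요!!
--     deq = deque()
--     for i in range(H):
--       for j in range(W):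
--         if new_sto[i][j] == -1 and not visited[i][j]: # 외부 공기에서 BFS(!!)
--           deq.append((i, j))
--           visited[i][j] = True
--           while deq:
--             y, x = deq.popleft()
--             for dy, dx in [(-1,0), (1,0), (0,-1), (0,1)]:
--               ny, nx = y + dy, x + dx
--               if 0 <= ny < H and 0 <= nx < W and not visited[ny][nx]:
--                 if new_sto[ny][nx] == 0:  # 제거된 칸을 외부로 변환
--                   new_sto[ny][nx] = -1
--                   deq.append((ny, nx))
--                 elif new_sto[ny][nx] == -1:  # 이미 외부면 계속 BFS
--                   deq.append((ny, nx))
--                 visited[ny][nx] = True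
--
--   return count
-- ===== SOURCE B (Python) =====
-- def solution(storage, requests):
--     n, m = len(storage), len(storage[0])
--     grid = [[-1] * (m + 2)]
--     for row in storage:
--         grid.append([-1] + list(row) + [-1])
--     grid.append([-1] * (m + 2))
--
--     def is_air(g, i, j):
--         return g[i - 1][j] == -1 or g[i + 1][j] == -1 or g[i][j - 1] == -1 or g[i][j + 1] == -1
--
--     count = n * m
--     for req in requests:
--         if len(req) == 1:
--             removed = [(i, j) for i in range(1, n + 1) for j in range(1, m + 1)
--                        if grid[i][j] == req and is_air(grid, i, j)]
--         else:
--             removed = [(i, j) for i in range(1, n + 1) for j in range(1, m + 1)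
--                        if grid[i][j] == req[0]]
--         count -= len(removed)
--         rem = set(removed)
--         grid = [[0 if (i, j) in rem else grid[i][j] for j in range(len(grid[i]))]
--                 for i in range(n + 2)]
--         # pure Jacobi-style relaxation to a fixpoint instead of a mutating multi-seed BFS
--         while True:
--             conv = [(i, j) for i in range(1, n + 1) for j in range(1, m + 1)
--                     if grid[i][j] == 0 and is_air(grid, i, j)]
--             if not conv:
--                 break
--             cs = set(conv)
--             grid = [[-1 if (i, j) in cs else grid[i][j] for j in range(len(grid[i]))]
--                     for i in range(n + 2)]
--     return count
-- ===== Notes on version B (the rewrite author's own statement) =====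
-- stated objective: alternative
-- what changed: B replaces A's in-place removal scans and per-request multi-seed BFS over a deque with a visited matrix by pure pointwise passes: removals are computed as a comprehension over the grid and the outside air is spread by a Jacobi-style full-grid relaxation repeated to a fixpoint.
import Mathlib
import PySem

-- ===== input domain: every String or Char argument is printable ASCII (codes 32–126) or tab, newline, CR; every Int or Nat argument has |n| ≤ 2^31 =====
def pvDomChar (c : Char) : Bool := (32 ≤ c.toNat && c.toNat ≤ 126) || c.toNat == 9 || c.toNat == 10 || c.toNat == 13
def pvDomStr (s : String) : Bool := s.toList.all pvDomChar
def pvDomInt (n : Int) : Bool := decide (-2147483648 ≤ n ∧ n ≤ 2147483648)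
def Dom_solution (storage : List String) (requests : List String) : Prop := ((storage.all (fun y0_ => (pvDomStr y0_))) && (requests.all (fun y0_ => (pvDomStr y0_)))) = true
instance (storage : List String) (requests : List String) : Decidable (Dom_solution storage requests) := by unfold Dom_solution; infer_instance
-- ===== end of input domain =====

-- B replaces A's in-place scans and per-request multi-seed BFS (deque + visited matrix) by pure
-- pointwise passes and a Jacobi-style relaxation to a fixpoint; objective: alternative (not faster).
-- Both Pythons only read their arguments; no mutation of the inputs.

-- ===== PORT A =====
-- Python's list-of-lists grid is ported as an indexing function ℤ → ℤ → ℤ (same values at every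
-- index the Python ever reads; cell = -1 outside air, 0 removed, char code for a letter; -2 marks
-- indices past the end of a padded row, which the Python only reaches on inputs excluded by Pre_).
abbrev PvGrid := Int → Int → Int
abbrev PvVis := Int → Int → Bool

def gwrite (g : PvGrid) (i j v : Int) : PvGrid := fun a b => if a = i ∧ b = j then v else g a b
def vwrite (v : PvVis) (i j : Int) : PvVis := fun a b => if a = i ∧ b = j then true else v a b

-- Python's list-of-lists grid, carried between requests as data (exactly Python's new_sto / grid);
-- readG/tabG convert between the table and the indexing-function view used inside one request.
def readG (t : List (List Int)) (a b : Int) : Int := (t.getD a.toNat []).getD b.toNat (-2)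
def tabG (H W : Int) (g : PvGrid) : List (List Int) :=
  (List.range H.toNat).map
    (fun i => (List.range W.toNat).map (fun j => g (Int.ofNat i) (Int.ofNat j)))

-- new_sto built by A (and grid built by B: the build lines are identical in both Pythons):
-- [[-1]*(m+2)] ++ [[-1] + list(row) + [-1] for row in storage] ++ [[-1]*(m+2)]
def mkGrid (storage : List String) : PvGrid := fun i j =>
  let n : Int := storage.length
  let m : Int := (storage.headD "").length
  if i = 0 ∨ i = n + 1 then (if 0 ≤ j ∧ j ≤ m + 1 then -1 else -2)
  else if 1 ≤ i ∧ i ≤ n then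
    let cs := (storage.getD (i - 1).toNat "").toList
    if j = 0 ∨ j = (cs.length : Int) + 1 then -1
    else if 1 ≤ j ∧ j ≤ (cs.length : Int) then ((cs.getD (j - 1).toNat ' ').toNat : Int)
    else -2
  else -2

-- 'for i in range(a,b): for j in range(c,d)' row-major cell enumeration (same double loop in both Pythons)
def rowMajor (a b c d : Int) : List (Int × Int) :=
  (PySem.List.pyRange a b 1).flatMap (fun i => (PySem.List.pyRange c d 1).map (fun j => (i, j)))

def dirsA : List (Int × Int) := [(-1,0),(1,0),(0,-1),(0,1)]

-- forklift body: if new_sto[i][j]==req then dir loop with break (= short-circuit disjunction, same order)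
def forkCell (ch : Int) (st : PvGrid × Int) (p : Int × Int) : PvGrid × Int :=
  let i := p.1; let j := p.2
  if st.1 i j = ch then
    if st.1 (i-1) j = -1 ∨ st.1 (i+1) j = -1 ∨ st.1 i (j-1) = -1 ∨ st.1 i (j+1) = -1
    then (gwrite st.1 i j 0, st.2 - 1) else st
  else st

def craneCell (ch : Int) (st : PvGrid × Int) (p : Int × Int) : PvGrid × Int :=
  if st.1 p.1 p.2 = ch then (gwrite st.1 p.1 p.2 0, st.2 - 1) else st

-- one neighbour check of the while-deq body
def drainDir (H W y x : Int) (st : PvGrid × PvVis × List (Int × Int)) (d : Int × Int) :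
    PvGrid × PvVis × List (Int × Int) :=
  let ny := y + d.1; let nx := x + d.2
  if 0 ≤ ny ∧ ny < H ∧ 0 ≤ nx ∧ nx < W ∧ st.2.1 ny nx = false then
    if st.1 ny nx = 0 then (gwrite st.1 ny nx (-1), vwrite st.2.1 ny nx, st.2.2 ++ [(ny, nx)])
    else if st.1 ny nx = -1 then (st.1, vwrite st.2.1 ny nx, st.2.2 ++ [(ny, nx)])
    else (st.1, vwrite st.2.1 ny nx, st.2.2)
  else st

-- 'while deq:' (fuel (H*W)+1 is proved sufficient below: each cell is enqueued at most once)
def drainA (H W : Int) : Nat → PvGrid → PvVis → List (Int × Int) → PvGrid × PvVis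
  | 0, g, v, _ => (g, v)
  | _ + 1, g, v, [] => (g, v)
  | f + 1, g, v, (y, x) :: rest =>
      let st := dirsA.foldl (drainDir H W y x) (g, v, rest)
      drainA H W f st.1 st.2.1 st.2.2

-- the per-request BFS phase: scan all cells, seed each unvisited -1 cell and drain the deque
def bfsA (H W : Int) (g0 : PvGrid) : PvGrid :=
  ((rowMajor 0 H 0 W).foldl
    (fun (st : PvGrid × PvVis) p =>
      if st.1 p.1 p.2 = -1 ∧ st.2 p.1 p.2 = false then
        drainA H W ((H * W).toNat + 1) st.1 (vwrite st.2 p.1 p.2) [p]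
      else st)
    (g0, fun _ _ => false)).1

def stepA (n m : Int) (st : List (List Int) × Int) (req : String) : List (List Int) × Int :=
  match req.toList with
  | [] => st  -- empty request: inside Pre_ only when m = 0, where A's scans and BFS do nothing
  | c :: rest =>
    let p1 :=
      if rest = [] then
        (rowMajor 1 (n+1) 1 (m+1)).foldl (forkCell (c.toNat : Int)) (readG st.1, st.2)
      else (rowMajor 1 (n+1) 1 (m+1)).foldl (craneCell (c.toNat : Int)) (readG st.1, st.2)
    (tabG (n+2) (m+2) (bfsA (n+2) (m+2) p1.1), p1.2)

def solution (storage : List String) (requests : List String) : Int :=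
  let n : Int := storage.length
  let m : Int := (storage.headD "").length
  (requests.foldl (stepA n m) (tabG (n+2) (m+2) (mkGrid storage), n * m)).2

-- ===== PORT B =====
-- Source B's is_air(g,i,j)
def isAirB (g : PvGrid) (i j : Int) : Bool :=
  (g (i-1) j == -1) || (g (i+1) j == -1) || (g i (j-1) == -1) || (g i (j+1) == -1)

-- '[v if (i,j) in ps else g[i][j] ...]' pure rebuild of the grid
def overrideB (ps : List (Int × Int)) (v : Int) (g : PvGrid) : PvGrid :=
  fun a b => if (a, b) ∈ ps then v else g a b

-- conv = [(i,j) ... if grid[i][j] == 0 and is_air(grid,i,j)]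
def convListB (n m : Int) (g : PvGrid) : List (Int × Int) :=
  (rowMajor 1 (n+1) 1 (m+1)).filter (fun p => g p.1 p.2 == 0 && isAirB g p.1 p.2)

-- 'while True: conv = ...; if not conv: break; grid = override' (fuel n*m+1 proved sufficient:
-- every changed pass converts at least one remaining 0-cell)
def spreadB (n m : Int) : Nat → PvGrid → PvGrid
  | 0, g => g
  | f + 1, g =>
      let conv := convListB n m g
      if conv = [] then g else spreadB n m f (overrideB conv (-1) g)

def stepB (n m : Int) (st : List (List Int) × Int) (req : String) : List (List Int) × Int :=
  match req.toList with
  | [] => st  -- as in A: inside Pre_ an empty request only occurs with m = 0, a no-op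
  | c :: rest =>
    let L :=
      if rest = [] then
        (rowMajor 1 (n+1) 1 (m+1)).filter
          (fun p => readG st.1 p.1 p.2 == (c.toNat : Int) && isAirB (readG st.1) p.1 p.2)
      else
        (rowMajor 1 (n+1) 1 (m+1)).filter (fun p => readG st.1 p.1 p.2 == (c.toNat : Int))
    (tabG (n+2) (m+2) (spreadB n m ((n * m).toNat + 1) (overrideB L 0 (readG st.1))),
      st.2 - L.length)

def solution_alt (storage : List String) (requests : List String) : Int :=
  let n : Int := storage.length
  let m : Int := (storage.headD "").length
  (requests.foldl (stepB n m) (tabG (n+2) (m+2) (mkGrid storage), n * m)).2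

-- ===== PRECONDITION & SPEC =====
-- Pre_ is exactly the set of inputs on which Python A returns normally: A raises IndexError when
-- storage is empty (storage[0]), when a request makes it scan a row shorter than the first row,
-- or when a crane request '' reaches req[0] with a nonempty scan range (m ≥ 1).
def Pre_solution (storage : List String) (requests : List String) : Prop :=
  storage ≠ [] ∧
  (requests = [] ∨
    ((∀ s ∈ storage, (storage.headD "").length ≤ s.length) ∧
     ((storage.headD "").length = 0 ∨ ∀ r ∈ requests, r ≠ "")))
instance (storage : List String) (requests : List String) : Decidable (Pre_solution storage requests) := by
  unfold Pre_solution; infer_instance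

def pvWitness_solution : List String × List String := (["AB", "CB"], ["B", "A!", "B"])

def Spec_solution (storage : List String) (requests : List String) (out : Int) : Prop := out = solution_alt storage requests
instance (storage : List String) (requests : List String) (out : Int) : Decidable (Spec_solution storage requests out) := by unfold Spec_solution; infer_instance

-- ===== CLAIM (what is proved, stated in full; the proofs are below) =====
def Claim_equal_solution : Prop := ∀ (storage : List String) (requests : List String), Dom_solution storage requests → Pre_solution storage requests → Spec_solution storage requests (solution storage requests)

-- ===== LEMMAS AND PROOFS =====

-- adjacency and the in-range predicate of the padded H×W board
def adjP (p q : Int × Int) : Prop :=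
  q = (p.1 - 1, p.2) ∨ q = (p.1 + 1, p.2) ∨ q = (p.1, p.2 - 1) ∨ q = (p.1, p.2 + 1)

def inRP (H W : Int) (p : Int × Int) : Prop := 0 ≤ p.1 ∧ p.1 < H ∧ 0 ≤ p.2 ∧ p.2 < W

-- outside air on grid g: a -1 cell, or a 0 cell adjacent to outside air (both ports compute this set)
inductive AirR (H W : Int) (g : PvGrid) : Int × Int → Prop
  | base (p : Int × Int) : inRP H W p → g p.1 p.2 = -1 → AirR H W g p
  | step (p q : Int × Int) : AirR H W g p → adjP p q → inRP H W q → g q.1 q.2 = 0 → AirR H W g q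

-- what one air-spreading phase must produce, pointwise
def SpreadEq (H W : Int) (g g' : PvGrid) : Prop :=
  ∀ a b, (g a b = 0 ∧ AirR H W g (a, b) → g' a b = -1) ∧
         (¬(g a b = 0 ∧ AirR H W g (a, b)) → g' a b = g a b)

theorem spreadEq_unique (H W : Int) (g x y : PvGrid)
    (hx : SpreadEq H W g x) (hy : SpreadEq H W g y) : x = y := by
  funext a b
  by_cases h : g a b = 0 ∧ AirR H W g (a, b)
  · rw [(hx a b).1 h, (hy a b).1 h]
  · rw [(hx a b).2 h, (hy a b).2 h]

-- --- basic facts about the cell enumeration ---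

theorem mem_rowMajor {a b c d : Int} {p : Int × Int} :
    p ∈ rowMajor a b c d ↔ (a ≤ p.1 ∧ p.1 < b) ∧ (c ≤ p.2 ∧ p.2 < d) := by
  cases p with
  | mk i j =>
    simp only [rowMajor, List.mem_flatMap, List.mem_map, PySem.List.mem_pyRange_one,
      Prod.mk.injEq]
    constructor
    · rintro ⟨x, hx, y, hy, rfl, rfl⟩; exact ⟨hx, hy⟩
    · rintro ⟨hi, hj⟩; exact ⟨i, hi, j, hj, rfl, rfl⟩

theorem nodup_rowMajor {a b c d : Int} : (rowMajor a b c d).Nodup := by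
  unfold rowMajor
  refine List.nodup_flatMap.2 ⟨fun i _ => ?_, ?_⟩
  · exact (PySem.List.nodup_pyRange_one _ _).map (fun x y h => by
      simpa using congrArg Prod.snd h)
  · refine (PySem.List.nodup_pyRange_one _ _).imp ?_
    intro i i' hne
    simp only [Function.onFun, List.disjoint_left, List.mem_map]
    rintro p ⟨x, _, rfl⟩ ⟨y, _, h⟩
    exact hne (by simpa using (congrArg Prod.fst h).symm)

theorem length_rowMajor {a b c d : Int} :
    (rowMajor a b c d).length = (b - a).toNat * (d - c).toNat := by
  simp [rowMajor, List.length_flatMap, PySem.List.length_pyRange_one, Function.comp]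

-- --- inversion facts about AirR and adjacency ---

theorem AirR_inR {H W : Int} {g : PvGrid} {p : Int × Int} (h : AirR H W g p) : inRP H W p := by
  cases h with
  | base _ h1 _ => exact h1
  | step _ _ _ _ h1 _ => exact h1

theorem AirR_val {H W : Int} {g : PvGrid} {p : Int × Int} (h : AirR H W g p) :
    g p.1 p.2 = -1 ∨ g p.1 p.2 = 0 := by
  cases h with
  | base _ _ h2 => exact Or.inl h2
  | step _ _ _ _ _ h2 => exact Or.inr h2

theorem adjP_iff {p q : Int × Int} :
    adjP p q ↔ ∃ d ∈ dirsA, q = (p.1 + d.1, p.2 + d.2) := by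
  simp only [adjP, dirsA, List.mem_cons, List.mem_singleton]
  constructor
  · rintro (h | h | h | h)
    · exact ⟨(-1, 0), by simp, by simpa [sub_eq_add_neg] using h⟩
    · exact ⟨(1, 0), by simp, by simpa using h⟩
    · exact ⟨(0, -1), by simp, by simpa [sub_eq_add_neg] using h⟩
    · exact ⟨(0, 1), by simp, by simpa using h⟩
  · rintro ⟨d, hd, rfl⟩
    rcases hd with rfl | rfl | rfl | rfl | h
    · left; simp [Prod.ext_iff]; omega
    · right; left; simp
    · right; right; left; simp [Prod.ext_iff]; omega
    · right; right; right; simp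
    · cases h

theorem adjP_symm {p q : Int × Int} (h : adjP p q) : adjP q p := by
  rcases h with h | h | h | h <;> subst h <;> simp [adjP, Prod.ext_iff] <;> omega

-- --- the pointwise soundness relation between a phase-start grid and an evolving grid ---

def ConvP (H W : Int) (g0 g : PvGrid) : Prop :=
  ∀ a b, g a b = g0 a b ∨ (g0 a b = 0 ∧ g a b = -1 ∧ AirR H W g0 (a, b))

theorem convP_refl {H W : Int} {g0 : PvGrid} : ConvP H W g0 g0 := fun _ _ => Or.inl rfl

theorem convP_zero {H W : Int} {g0 g : PvGrid} (h : ConvP H W g0 g) {a b : Int}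
    (h0 : g a b = 0) : g0 a b = 0 := by
  rcases h a b with h1 | ⟨h1, _, _⟩
  · omega
  · exact h1

theorem convP_neg {H W : Int} {g0 g : PvGrid} (h : ConvP H W g0 g) {a b : Int}
    (h0 : g0 a b = -1) : g a b = -1 := by
  rcases h a b with h1 | ⟨h1, _, _⟩ <;> omega

theorem convP_air {H W : Int} {g0 g : PvGrid} (h : ConvP H W g0 g) {a b : Int}
    (hin : inRP H W (a, b)) (h0 : g a b = -1) : AirR H W g0 (a, b) := by
  rcases h a b with h1 | ⟨_, _, h3⟩
  · have hg : g0 a b = -1 := by omega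
    exact AirR.base _ hin hg
  · exact h3

-- --- a strict countP decrease for the relaxation measure ---

theorem countP_lt_countP {α : Type} (l : List α) (p q : α → Bool)
    (hle : ∀ x ∈ l, q x = true → p x = true)
    (hstrict : ∃ x ∈ l, p x = true ∧ q x = false) :
    l.countP q < l.countP p := by
  induction l with
  | nil => rcases hstrict with ⟨x, hx, _⟩; cases hx
  | cons y tl ih =>
    rcases hstrict with ⟨x, hx, hpx, hqx⟩
    rcases List.mem_cons.mp hx with rfl | hxtl
    · have hq : q x = false := hqx
      have hcnt : tl.countP q ≤ tl.countP p :=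
        List.countP_mono_left (fun z hz hqz => hle z (List.mem_cons_of_mem _ hz) hqz)
      simp [List.countP_cons, hq, hpx]
      omega
    · by_cases hq : q y = true
      · have hp : p y = true := hle y (List.mem_cons_self) hq
        have := ih (fun z hz => hle z (List.mem_cons_of_mem _ hz)) ⟨x, hxtl, hpx, hqx⟩
        simp [List.countP_cons, hq, hp]
        omega
      · have hcnt := ih (fun z hz => hle z (List.mem_cons_of_mem _ hz)) ⟨x, hxtl, hpx, hqx⟩
        have hqy : q y = false := by simpa using hq
        simp [List.countP_cons, hqy]
        cases hpy : p y <;> simp [hpy] <;> omega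

-- --- the removal scans: A's mutating fold equals B's filter/override, pointwise ---

theorem isAirB_iff {g' g : PvGrid} (hair : ∀ a b, g' a b = -1 ↔ g a b = -1) (i j : Int) :
    (g' (i-1) j = -1 ∨ g' (i+1) j = -1 ∨ g' i (j-1) = -1 ∨ g' i (j+1) = -1) ↔
      isAirB g i j = true := by
  simp [isAirB, hair]; tauto

theorem fork_fold (ch : Int) (hch : ch ≠ -1) (g : PvGrid) (cells : List (Int × Int)) :
    ∀ (g' : PvGrid) (k : Int),
      cells.Nodup →
      (∀ p ∈ cells, g' p.1 p.2 = g p.1 p.2) →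
      (∀ a b, g' a b = -1 ↔ g a b = -1) →
      cells.foldl (forkCell ch) (g', k) =
        (overrideB (cells.filter (fun p => g p.1 p.2 == ch && isAirB g p.1 p.2)) 0 g',
         k - (cells.filter (fun p => g p.1 p.2 == ch && isAirB g p.1 p.2)).length) := by
  induction cells with
  | nil =>
    intro g' k _ _ _
    refine Prod.ext ?_ (by simp)
    funext a b; simp [overrideB]
  | cons p tl ih =>
    intro g' k hnd hv hair
    obtain ⟨hp_tl, hnd'⟩ := List.nodup_cons.mp hnd
    have hvp : g' p.1 p.2 = g p.1 p.2 := hv p List.mem_cons_self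
    by_cases hc : g p.1 p.2 = ch
    · by_cases hairp : isAirB g p.1 p.2 = true
      · have hstep : forkCell ch (g', k) p = (gwrite g' p.1 p.2 0, k - 1) := by
          have hA : g' (p.1-1) p.2 = -1 ∨ g' (p.1+1) p.2 = -1 ∨
              g' p.1 (p.2-1) = -1 ∨ g' p.1 (p.2+1) = -1 := (isAirB_iff hair p.1 p.2).mpr hairp
          simp [forkCell, hvp, hc, hA]
        have hv' : ∀ q ∈ tl, (gwrite g' p.1 p.2 0) q.1 q.2 = g q.1 q.2 := by
          intro q hq
          have hqp : q ≠ p := fun h => hp_tl (h ▸ hq)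
          have : ¬(q.1 = p.1 ∧ q.2 = p.2) := by
            intro hh; exact hqp (Prod.ext hh.1 hh.2)
          simp [gwrite, this]; exact hv q (List.mem_cons_of_mem _ hq)
        have hair' : ∀ a b, (gwrite g' p.1 p.2 0) a b = -1 ↔ g a b = -1 := by
          intro a b
          by_cases hab : a = p.1 ∧ b = p.2
          · obtain ⟨rfl, rfl⟩ := hab
            simp [gwrite]
            intro h; rw [hc] at h; exact hch h
          · rw [show (gwrite g' p.1 p.2 0) a b = g' a b by simp [gwrite, hab]]
            exact hair a b
        rw [List.foldl_cons, hstep, ih _ _ hnd' hv' hair']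
        have hfc : (p :: tl).filter (fun p => g p.1 p.2 == ch && isAirB g p.1 p.2) =
            p :: tl.filter (fun p => g p.1 p.2 == ch && isAirB g p.1 p.2) :=
          List.filter_cons_of_pos (by simp [hc, hairp])
        rw [hfc]
        refine Prod.ext ?_ ?_
        · funext a b
          by_cases hmem : (a, b) ∈ tl.filter (fun p => g p.1 p.2 == ch && isAirB g p.1 p.2)
          · simp [overrideB, hmem]
          · by_cases hab : a = p.1 ∧ b = p.2
            · obtain ⟨rfl, rfl⟩ := hab
              simp [overrideB, hmem, gwrite]
            · have habp : (a, b) ≠ p := by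
                intro hh; exact hab ⟨congrArg Prod.fst hh, congrArg Prod.snd hh⟩
              simp [overrideB, hmem, gwrite, hab, habp]
        · simp; omega
      · have hstep : forkCell ch (g', k) p = (g', k) := by
          have hA : ¬(g' (p.1-1) p.2 = -1 ∨ g' (p.1+1) p.2 = -1 ∨
              g' p.1 (p.2-1) = -1 ∨ g' p.1 (p.2+1) = -1) := by
            rw [isAirB_iff hair]; simp [hairp]
          simp [forkCell, hvp, hc, hA]
        have hfc : (p :: tl).filter (fun p => g p.1 p.2 == ch && isAirB g p.1 p.2) =
            tl.filter (fun p => g p.1 p.2 == ch && isAirB g p.1 p.2) :=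
          List.filter_cons_of_neg (by simp [hairp])
        rw [List.foldl_cons, hstep, hfc]
        exact ih _ _ hnd' (fun q hq => hv q (List.mem_cons_of_mem _ hq)) hair
    · have hstep : forkCell ch (g', k) p = (g', k) := by
        simp [forkCell, hvp, hc]
      have hfc : (p :: tl).filter (fun p => g p.1 p.2 == ch && isAirB g p.1 p.2) =
          tl.filter (fun p => g p.1 p.2 == ch && isAirB g p.1 p.2) :=
        List.filter_cons_of_neg (by simp [hc])
      rw [List.foldl_cons, hstep, hfc]
      exact ih _ _ hnd' (fun q hq => hv q (List.mem_cons_of_mem _ hq)) hair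

theorem crane_fold (ch : Int) (hch : ch ≠ -1) (g : PvGrid) (cells : List (Int × Int)) :
    ∀ (g' : PvGrid) (k : Int),
      cells.Nodup →
      (∀ p ∈ cells, g' p.1 p.2 = g p.1 p.2) →
      cells.foldl (craneCell ch) (g', k) =
        (overrideB (cells.filter (fun p => g p.1 p.2 == ch)) 0 g',
         k - (cells.filter (fun p => g p.1 p.2 == ch)).length) := by
  induction cells with
  | nil =>
    intro g' k _ _
    refine Prod.ext ?_ (by simp)
    funext a b; simp [overrideB]
  | cons p tl ih =>
    intro g' k hnd hv
    obtain ⟨hp_tl, hnd'⟩ := List.nodup_cons.mp hnd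
    have hvp : g' p.1 p.2 = g p.1 p.2 := hv p List.mem_cons_self
    by_cases hc : g p.1 p.2 = ch
    · have hstep : craneCell ch (g', k) p = (gwrite g' p.1 p.2 0, k - 1) := by
        simp [craneCell, hvp, hc]
      have hv' : ∀ q ∈ tl, (gwrite g' p.1 p.2 0) q.1 q.2 = g q.1 q.2 := by
        intro q hq
        have hqp : q ≠ p := fun h => hp_tl (h ▸ hq)
        have : ¬(q.1 = p.1 ∧ q.2 = p.2) := by
          intro hh; exact hqp (Prod.ext hh.1 hh.2)
        simp [gwrite, this]; exact hv q (List.mem_cons_of_mem _ hq)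
      rw [List.foldl_cons, hstep, ih _ _ hnd' hv']
      have hfc : (p :: tl).filter (fun p => g p.1 p.2 == ch) =
          p :: tl.filter (fun p => g p.1 p.2 == ch) :=
        List.filter_cons_of_pos (by simp [hc])
      rw [hfc]
      refine Prod.ext ?_ ?_
      · funext a b
        by_cases hmem : (a, b) ∈ tl.filter (fun p => g p.1 p.2 == ch)
        · simp [overrideB, hmem]
        · by_cases hab : a = p.1 ∧ b = p.2
          · obtain ⟨rfl, rfl⟩ := hab
            simp [overrideB, hmem, gwrite]
          · have habp : (a, b) ≠ p := by
              intro hh; exact hab ⟨congrArg Prod.fst hh, congrArg Prod.snd hh⟩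
            simp [overrideB, hmem, gwrite, hab, habp]
      · simp; omega
    · have hstep : craneCell ch (g', k) p = (g', k) := by
        simp [craneCell, hvp, hc]
      have hfc : (p :: tl).filter (fun p => g p.1 p.2 == ch) =
          tl.filter (fun p => g p.1 p.2 == ch) :=
        List.filter_cons_of_neg (by simp [hc])
      rw [List.foldl_cons, hstep, hfc]
      exact ih _ _ hnd' (fun q hq => hv q (List.mem_cons_of_mem _ hq))

-- --- B's relaxation loop computes SpreadEq ---

def ZcB (n m : Int) (g : PvGrid) : Nat :=
  (rowMajor 1 (n+1) 1 (m+1)).countP (fun p => g p.1 p.2 == 0)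

theorem mem_convListB {n m : Int} {g : PvGrid} {p : Int × Int} :
    p ∈ convListB n m g ↔
      p ∈ rowMajor 1 (n+1) 1 (m+1) ∧ g p.1 p.2 = 0 ∧ isAirB g p.1 p.2 = true := by
  simp [convListB, List.mem_filter, and_assoc]

theorem isAirB_exists {g : PvGrid} {a b : Int} (h : isAirB g a b = true) :
    ∃ u, adjP (a, b) u ∧ g u.1 u.2 = -1 := by
  simp only [isAirB, Bool.or_eq_true, beq_iff_eq] at h
  rcases h with ((h | h) | h) | h
  · exact ⟨(a - 1, b), Or.inl rfl, h⟩
  · exact ⟨(a + 1, b), Or.inr (Or.inl rfl), h⟩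
  · exact ⟨(a, b - 1), Or.inr (Or.inr (Or.inl rfl)), h⟩
  · exact ⟨(a, b + 1), Or.inr (Or.inr (Or.inr rfl)), h⟩

theorem adj_inR {n m a b : Int} {u : Int × Int}
    (hin : 1 ≤ a ∧ a < n + 1 ∧ 1 ≤ b ∧ b < m + 1) (hadj : adjP (a, b) u) :
    inRP (n + 2) (m + 2) u := by
  rcases hadj with h | h | h | h <;> subst h <;> dsimp only [inRP] <;> omega

theorem override_conv_convP {n m : Int} {gR g : PvGrid}
    (hc : ConvP (n+2) (m+2) gR g) :
    ConvP (n+2) (m+2) gR (overrideB (convListB n m g) (-1) g) := by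
  intro a b
  by_cases hmem : (a, b) ∈ convListB n m g
  · obtain ⟨hrm, h0, hairb⟩ := mem_convListB.mp hmem
    obtain ⟨u, hadj, hu⟩ := isAirB_exists hairb
    have hbounds : (1 ≤ a ∧ a < n + 1) ∧ 1 ≤ b ∧ b < m + 1 := mem_rowMajor.mp hrm
    have huin : inRP (n+2) (m+2) u :=
      adj_inR ⟨hbounds.1.1, hbounds.1.2, hbounds.2.1, hbounds.2.2⟩ hadj
    have hUair : AirR (n+2) (m+2) gR u := convP_air hc huin hu
    have habin : inRP (n+2) (m+2) (a, b) := by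
      simp only [inRP]; refine ⟨by omega, by omega, by omega, by omega⟩
    have h0R : gR a b = 0 := convP_zero hc h0
    refine Or.inr ⟨h0R, by simp [overrideB, hmem], ?_⟩
    exact AirR.step u (a, b) hUair (adjP_symm hadj) habin h0R
  · rw [show overrideB (convListB n m g) (-1) g a b = g a b by simp [overrideB, hmem]]
    exact hc a b

theorem spread_fix (n m : Int) (gR : PvGrid) :
    ∀ (fuel : Nat) (g : PvGrid), ConvP (n+2) (m+2) gR g → ZcB n m g < fuel →
      ConvP (n+2) (m+2) gR (spreadB n m fuel g) ∧
        convListB n m (spreadB n m fuel g) = [] := by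
  intro fuel
  induction fuel with
  | zero => intro g _ hz; omega
  | succ f ih =>
    intro g hc hz
    by_cases hcv : convListB n m g = []
    · constructor
      · simpa [spreadB, hcv] using hc
      · simpa [spreadB, hcv] using hcv
    · have hstep : spreadB n m (f + 1) g = spreadB n m f (overrideB (convListB n m g) (-1) g) := by
        simp [spreadB, hcv]
      rw [hstep]
      have hc' := override_conv_convP (n := n) (m := m) hc
      have hzlt : ZcB n m (overrideB (convListB n m g) (-1) g) < ZcB n m g := by
        apply countP_lt_countP
        · intro x hx hq
          simp only [beq_iff_eq] at hq ⊢
          by_cases hxm : x ∈ convListB n m g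
          · exfalso
            have : overrideB (convListB n m g) (-1) g x.1 x.2 = -1 := by
              simp [overrideB, Prod.mk.eta, hxm]
            omega
          · have : overrideB (convListB n m g) (-1) g x.1 x.2 = g x.1 x.2 := by
              simp [overrideB, Prod.mk.eta, hxm]
            omega
        · obtain ⟨x, hxm⟩ := List.exists_mem_of_ne_nil _ hcv
          obtain ⟨hrm, h0, _⟩ := mem_convListB.mp hxm
          have hov : overrideB (convListB n m g) (-1) g x.1 x.2 = -1 := by
            simp [overrideB, Prod.mk.eta, hxm]
          exact ⟨x, hrm, by simpa using h0, by simp [hov]⟩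
      exact ih _ hc' (by omega)

theorem spreadEq_of_fix (n m : Int) (gR r : PvGrid)
    (hz0 : ∀ a b, gR a b = 0 → 1 ≤ a ∧ a < n + 1 ∧ 1 ≤ b ∧ b < m + 1)
    (hconv : ConvP (n+2) (m+2) gR r) (hfix : convListB n m r = []) :
    SpreadEq (n+2) (m+2) gR r := by
  have hAll : ∀ p, AirR (n+2) (m+2) gR p → r p.1 p.2 = -1 := by
    intro p h
    induction h with
    | base q hin hval => exact convP_neg hconv hval
    | step p q hp hadj hin h0 ih =>
      rcases hconv q.1 q.2 with heq | ⟨_, hneg, _⟩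
      · -- r q = gR q = 0 : then q would still be in the conversion list, contradicting the fixpoint
        exfalso
        have hq0 : r q.1 q.2 = 0 := by omega
        have hbounds := hz0 q.1 q.2 h0
        have hairb : isAirB r q.1 q.2 = true := by
          rcases hadj with hh | hh | hh | hh <;> subst hh <;>
            simp only [isAirB, Bool.or_eq_true, beq_iff_eq] <;>
            [exact Or.inl (Or.inl (Or.inr (by simpa using ih)));
             exact Or.inl (Or.inl (Or.inl (by simpa using ih)));
             exact Or.inr (by simpa using ih);
             exact Or.inl (Or.inr (by simpa using ih))]
        have hqmem : q ∈ convListB n m r := by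
          refine mem_convListB.mpr ⟨mem_rowMajor.mpr ⟨⟨hbounds.1, hbounds.2.1⟩, hbounds.2.2⟩, hq0, hairb⟩
        rw [hfix] at hqmem
        cases hqmem
      · exact hneg
  intro a b
  constructor
  · rintro ⟨h0, hair⟩
    exact hAll (a, b) hair
  · intro hnot
    rcases hconv a b with heq | ⟨h1, _, h3⟩
    · exact heq
    · exact absurd ⟨h1, h3⟩ hnot

theorem spreadB_spec (n m : Int) (hn : 0 ≤ n) (hm : 0 ≤ m) (gR : PvGrid)
    (hz0 : ∀ a b, gR a b = 0 → 1 ≤ a ∧ a < n + 1 ∧ 1 ≤ b ∧ b < m + 1) :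
    SpreadEq (n+2) (m+2) gR (spreadB n m ((n * m).toNat + 1) gR) := by
  have hmul : (n * m).toNat = n.toNat * m.toNat := by
    conv_lhs => rw [show n = ((n.toNat : Int)) from (Int.toNat_of_nonneg hn).symm,
      show m = ((m.toNat : Int)) from (Int.toNat_of_nonneg hm).symm]
    push_cast
    exact Int.toNat_natCast _
  have hZ : ZcB n m gR ≤ (n * m).toNat := by
    calc ZcB n m gR ≤ (rowMajor 1 (n+1) 1 (m+1)).length := List.countP_le_length
    _ = (n + 1 - 1).toNat * (m + 1 - 1).toNat := length_rowMajor
    _ = (n * m).toNat := by rw [hmul]; norm_num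
  obtain ⟨hc, hfix⟩ := spread_fix n m gR ((n * m).toNat + 1) gR convP_refl (by omega)
  exact spreadEq_of_fix n m gR _ hz0 hc hfix

-- --- A's BFS: worklist invariants ---

theorem gwrite_eval (g : PvGrid) (i j v a b : Int) :
    gwrite g i j v a b = if a = i ∧ b = j then v else g a b := rfl

theorem vwrite_eval (v : PvVis) (i j a b : Int) :
    vwrite v i j a b = if a = i ∧ b = j then true else v a b := rfl

theorem adj_of_dir {y x : Int} {d : Int × Int} (hd : d ∈ dirsA) :
    adjP (y, x) (y + d.1, x + d.2) := by
  simp only [dirsA, List.mem_cons, List.not_mem_nil, or_false] at hd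
  rcases hd with rfl | rfl | rfl | rfl <;> simp [adjP, Prod.ext_iff] <;> omega

noncomputable def boardF (H W : Int) : Finset (Int × Int) := (Finset.Icc 0 (H-1)) ×ˢ (Finset.Icc 0 (W-1))

theorem mem_boardF {H W : Int} {p : Int × Int} : p ∈ boardF H W ↔ inRP H W p := by
  cases p with
  | mk a b =>
    simp only [boardF, Finset.mem_product, Finset.mem_Icc, inRP]
    omega

noncomputable def unvis (H W : Int) (v : PvVis) : Nat :=
  ((boardF H W).filter (fun p => v p.1 p.2 = false)).card

theorem unvis_le (H W : Int) (hH : 0 ≤ H) (hW : 0 ≤ W) (v : PvVis) :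
    unvis H W v ≤ (H * W).toNat := by
  have h1 : unvis H W v ≤ (boardF H W).card := Finset.card_filter_le _ _
  have h2 : (boardF H W).card = H.toNat * W.toNat := by
    simp [boardF, Finset.card_product, Int.card_Icc]
  have h3 : (H * W).toNat = H.toNat * W.toNat := by
    conv_lhs => rw [show H = ((H.toNat : Int)) from (Int.toNat_of_nonneg hH).symm,
      show W = ((W.toNat : Int)) from (Int.toNat_of_nonneg hW).symm]
    push_cast
    exact Int.toNat_natCast _
  omega

theorem unvis_vwrite (H W : Int) (v : PvVis) (i j : Int)
    (hin : inRP H W (i, j)) (hv : v i j = false) :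
    unvis H W (vwrite v i j) + 1 = unvis H W v := by
  have hset : (boardF H W).filter (fun p => (vwrite v i j) p.1 p.2 = false) =
      ((boardF H W).filter (fun p => v p.1 p.2 = false)).erase (i, j) := by
    ext q
    simp only [Finset.mem_erase, Finset.mem_filter, vwrite_eval]
    constructor
    · rintro ⟨hb, hval⟩
      by_cases hq : q.1 = i ∧ q.2 = j
      · rw [if_pos hq] at hval; cases hval
      · refine ⟨fun hh => hq ⟨congrArg Prod.fst hh, congrArg Prod.snd hh⟩, hb, ?_⟩
        rwa [if_neg hq] at hval
    · rintro ⟨hne, hb, hval⟩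
      have hq : ¬(q.1 = i ∧ q.2 = j) := by
        intro hh; exact hne (Prod.ext hh.1 hh.2)
      exact ⟨hb, by rwa [if_neg hq]⟩
  have hmem : ((i, j) : Int × Int) ∈ (boardF H W).filter (fun p => v p.1 p.2 = false) :=
    Finset.mem_filter.mpr ⟨mem_boardF.mpr hin, by simpa using hv⟩
  have hpos : 0 < ((boardF H W).filter (fun p => v p.1 p.2 = false)).card :=
    Finset.card_pos.mpr ⟨_, hmem⟩
  unfold unvis
  rw [hset, Finset.card_erase_of_mem hmem]
  omega

theorem unvis_mono (H W : Int) (v v' : PvVis)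
    (hmono : ∀ a b, v a b = true → v' a b = true) : unvis H W v' ≤ unvis H W v := by
  apply Finset.card_le_card
  intro q hq
  obtain ⟨hb, hval⟩ := Finset.mem_filter.mp hq
  refine Finset.mem_filter.mpr ⟨hb, ?_⟩
  cases hvq : v q.1 q.2 with
  | false => rfl
  | true => rw [hmono _ _ hvq] at hval; cases hval

def QCl (H W : Int) (g0 g : PvGrid) (p : Int × Int) : Prop :=
  inRP H W p ∧ AirR H W g0 p ∧ g p.1 p.2 = -1

def Cl5 (H W : Int) (g0 g : PvGrid) (v : PvVis) (ex : List (Int × Int)) : Prop :=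
  ∀ z : Int × Int, v z.1 z.2 = true → (g0 z.1 z.2 = -1 ∨ g0 z.1 z.2 = 0) →
    AirR H W g0 z ∧ g z.1 z.2 = -1 ∧
      (z ∈ ex ∨ ∀ d ∈ dirsA, inRP H W (z.1 + d.1, z.2 + d.2) → v (z.1 + d.1) (z.2 + d.2) = true)

-- the invariant of the inner direction loop, for popped cell (y, x)
def DB (H W : Int) (g0 : PvGrid) (y x : Int) (st : PvGrid × PvVis × List (Int × Int)) : Prop :=
  ConvP H W g0 st.1 ∧ st.2.2.Nodup ∧
  (∀ p ∈ st.2.2, st.2.1 p.1 p.2 = true ∧ QCl H W g0 st.1 p) ∧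
  (∀ a b, st.2.1 a b = true → inRP H W (a, b)) ∧
  Cl5 H W g0 st.1 st.2.1 ((y, x) :: st.2.2) ∧
  st.2.1 y x = true ∧ (y, x) ∉ st.2.2

theorem drainDir_spec (H W : Int) (g0 : PvGrid) (y x : Int) (d : Int × Int) (hd : d ∈ dirsA)
    (st : PvGrid × PvVis × List (Int × Int))
    (hpin : inRP H W (y, x)) (hpair : AirR H W g0 (y, x))
    (hdb : DB H W g0 y x st) :
    DB H W g0 y x (drainDir H W y x st d) ∧
    (∀ a b, st.2.1 a b = true → (drainDir H W y x st d).2.1 a b = true) ∧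
    (∀ a b, (drainDir H W y x st d).1 a b ≠ st.1 a b → (drainDir H W y x st d).2.1 a b = true) ∧
    (∀ a b, st.1 a b = -1 → (drainDir H W y x st d).1 a b = -1) ∧
    ((drainDir H W y x st d).2.2.length + unvis H W (drainDir H W y x st d).2.1 ≤
      st.2.2.length + unvis H W st.2.1) ∧
    (∀ p ∈ st.2.2, p ∈ (drainDir H W y x st d).2.2) ∧
    (inRP H W (y + d.1, x + d.2) → (drainDir H W y x st d).2.1 (y + d.1) (x + d.2) = true) := by
  obtain ⟨g, v, acc⟩ := st
  obtain ⟨hconv, hnd, hq, hvr, hc5, hvyx, hyx_acc⟩ := hdb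
  dsimp only at hconv hnd hq hvr hc5 hvyx hyx_acc
  by_cases hg : 0 ≤ y + d.1 ∧ y + d.1 < H ∧ 0 ≤ x + d.2 ∧ x + d.2 < W ∧ v (y + d.1) (x + d.2) = false
  case neg =>
    have hr : drainDir H W y x (g, v, acc) d = (g, v, acc) := by
      dsimp only [drainDir]; rw [if_neg hg]
    rw [hr]
    dsimp only [DB, QCl]
    refine ⟨⟨hconv, hnd, hq, hvr, hc5, hvyx, hyx_acc⟩, fun _ _ h => h, fun a b h => absurd rfl h,
      fun _ _ h => h, le_refl _, fun _ h => h, ?_⟩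
    intro hin
    obtain ⟨h1, h2, h3, h4⟩ := hin
    cases hval : v (y + d.1) (x + d.2) with
    | true => rfl
    | false => exact absurd ⟨h1, h2, h3, h4, hval⟩ hg
  case pos =>
    obtain ⟨h1, h2, h3, h4, hvfalse⟩ := hg
    have hnin : inRP H W (y + d.1, x + d.2) := ⟨h1, h2, h3, h4⟩
    have hadj : adjP (y, x) (y + d.1, x + d.2) := adj_of_dir hd
    have hnot_acc : ((y + d.1, x + d.2) : Int × Int) ∉ acc := by
      intro hmem
      have hvt := (hq _ hmem).1
      dsimp only at hvt
      rw [hvt] at hvfalse; cases hvfalse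
    have hne_yx : ((y + d.1, x + d.2) : Int × Int) ≠ (y, x) := by
      intro hh
      have e1 : y + d.1 = y := congrArg Prod.fst hh
      have e2 : x + d.2 = x := congrArg Prod.snd hh
      have hvv : v (y + d.1) (x + d.2) = true := by rw [e1, e2]; exact hvyx
      rw [hvv] at hvfalse; cases hvfalse
    have hvr' : ∀ a b, (vwrite v (y + d.1) (x + d.2)) a b = true → inRP H W (a, b) := by
      intro a b hv
      rw [vwrite_eval] at hv
      by_cases hab : a = y + d.1 ∧ b = x + d.2
      · obtain ⟨rfl, rfl⟩ := hab; exact hnin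
      · rw [if_neg hab] at hv; exact hvr a b hv
    have hvmono : ∀ a b, v a b = true → (vwrite v (y + d.1) (x + d.2)) a b = true := by
      intro a b hv; rw [vwrite_eval]; split <;> [rfl; exact hv]
    have hmeas : (acc.length + 1) + unvis H W (vwrite v (y + d.1) (x + d.2)) =
        acc.length + unvis H W v := by
      have := unvis_vwrite H W v (y + d.1) (x + d.2) hnin hvfalse
      omega
    have hvyx' : (vwrite v (y + d.1) (x + d.2)) y x = true := hvmono _ _ hvyx
    by_cases hg0 : g (y + d.1) (x + d.2) = 0
    · -- a removed cell joins the outside air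
      have hr : drainDir H W y x (g, v, acc) d =
          (gwrite g (y + d.1) (x + d.2) (-1), vwrite v (y + d.1) (x + d.2),
            acc ++ [(y + d.1, x + d.2)]) := by
        dsimp only [drainDir]
        rw [if_pos ⟨h1, h2, h3, h4, hvfalse⟩, if_pos hg0]
      rw [hr]
      dsimp only [DB, QCl]
      have hg0R : g0 (y + d.1) (x + d.2) = 0 := convP_zero hconv hg0
      have hairN : AirR H W g0 (y + d.1, x + d.2) :=
        AirR.step (y, x) _ hpair hadj hnin hg0R
      have hgpres : ∀ a b, g a b = -1 → gwrite g (y + d.1) (x + d.2) (-1) a b = -1 := by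
        intro a b hv; rw [gwrite_eval]; split <;> [rfl; exact hv]
      refine ⟨⟨?_, ?_, ?_, hvr', ?_, hvyx', ?_⟩, hvmono, ?_, hgpres, ?_, ?_, ?_⟩
      · -- ConvP
        intro a b
        by_cases hab : a = y + d.1 ∧ b = x + d.2
        · obtain ⟨rfl, rfl⟩ := hab
          exact Or.inr ⟨hg0R, by rw [gwrite_eval]; simp, hairN⟩
        · rw [show gwrite g (y + d.1) (x + d.2) (-1) a b = g a b by rw [gwrite_eval, if_neg hab]]
          exact hconv a b
      · -- Nodup
        refine List.Nodup.append hnd (List.nodup_singleton _) ?_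
        intro p hp
        simp only [List.mem_singleton]
        intro hh; rw [hh] at hp; exact hnot_acc hp
      · -- queue clause
        intro p hp
        rcases List.mem_append.mp hp with hpa | hps
        · obtain ⟨hv1, hin1, hair1, hneg1⟩ := hq p hpa
          exact ⟨hvmono _ _ hv1, hin1, hair1, hgpres _ _ hneg1⟩
        · rw [List.mem_singleton] at hps
          subst hps
          exact ⟨by dsimp only; rw [vwrite_eval]; simp, hnin, hairN,
            by dsimp only; rw [gwrite_eval]; simp⟩
      · -- Cl5
        intro z hvz hdom
        rw [vwrite_eval] at hvz
        by_cases hab : z.1 = y + d.1 ∧ z.2 = x + d.2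
        · have hz : z = (y + d.1, x + d.2) := Prod.ext hab.1 hab.2
          subst hz
          refine ⟨hairN, by dsimp only; rw [gwrite_eval]; simp, Or.inl ?_⟩
          simp
        · rw [if_neg hab] at hvz
          obtain ⟨hair1, hneg1, hrest⟩ := hc5 z hvz hdom
          refine ⟨hair1, hgpres _ _ hneg1, ?_⟩
          rcases hrest with hmem | hnbrs
          · left
            rcases List.mem_cons.mp hmem with hh | hh
            · exact List.mem_cons.mpr (Or.inl hh)
            · exact List.mem_cons.mpr (Or.inr (List.mem_append.mpr (Or.inl hh)))
          · right
            intro d' hd' hin'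
            exact hvmono _ _ (hnbrs d' hd' hin')
      · -- (y,x) not in new acc
        intro hmem
        rcases List.mem_append.mp hmem with hh | hh
        · exact hyx_acc hh
        · rw [List.mem_singleton] at hh; exact hne_yx hh.symm
      · -- change implies visited
        intro a b hne
        rw [gwrite_eval] at hne
        by_cases hab : a = y + d.1 ∧ b = x + d.2
        · obtain ⟨rfl, rfl⟩ := hab; rw [vwrite_eval]; simp
        · rw [if_neg hab] at hne; exact absurd rfl hne
      · -- measure
        rw [List.length_append]
        simp only [List.length_singleton]
        omega
      · exact fun p hp => List.mem_append.mpr (Or.inl hp)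
      · intro _; rw [vwrite_eval]; simp
    · by_cases hg1 : g (y + d.1) (x + d.2) = -1
      · -- an already-outside cell is enqueued
        have hr : drainDir H W y x (g, v, acc) d =
            (g, vwrite v (y + d.1) (x + d.2), acc ++ [(y + d.1, x + d.2)]) := by
          dsimp only [drainDir]
          rw [if_pos ⟨h1, h2, h3, h4, hvfalse⟩, if_neg hg0, if_pos hg1]
        rw [hr]
        dsimp only [DB, QCl]
        have hairN : AirR H W g0 (y + d.1, x + d.2) := convP_air hconv hnin hg1
        refine ⟨⟨hconv, ?_, ?_, hvr', ?_, hvyx', ?_⟩, hvmono, fun a b h => absurd rfl h,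
          fun _ _ h => h, ?_, fun p hp => List.mem_append.mpr (Or.inl hp), ?_⟩
        · refine List.Nodup.append hnd (List.nodup_singleton _) ?_
          intro p hp
          simp only [List.mem_singleton]
          intro hh; rw [hh] at hp; exact hnot_acc hp
        · intro p hp
          rcases List.mem_append.mp hp with hpa | hps
          · obtain ⟨hv1, hrest⟩ := hq p hpa
            exact ⟨hvmono _ _ hv1, hrest⟩
          · rw [List.mem_singleton] at hps
            subst hps
            exact ⟨by dsimp only; rw [vwrite_eval]; simp, hnin, hairN, hg1⟩
        · intro z hvz hdom
          rw [vwrite_eval] at hvz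
          by_cases hab : z.1 = y + d.1 ∧ z.2 = x + d.2
          · have hz : z = (y + d.1, x + d.2) := Prod.ext hab.1 hab.2
            subst hz
            refine ⟨hairN, by dsimp only; exact hg1, Or.inl ?_⟩
            simp
          · rw [if_neg hab] at hvz
            obtain ⟨hair1, hneg1, hrest⟩ := hc5 z hvz hdom
            refine ⟨hair1, hneg1, ?_⟩
            rcases hrest with hmem | hnbrs
            · left
              rcases List.mem_cons.mp hmem with hh | hh
              · exact List.mem_cons.mpr (Or.inl hh)
              · exact List.mem_cons.mpr (Or.inr (List.mem_append.mpr (Or.inl hh)))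
            · right
              intro d' hd' hin'
              exact hvmono _ _ (hnbrs d' hd' hin')
        · intro hmem
          rcases List.mem_append.mp hmem with hh | hh
          · exact hyx_acc hh
          · rw [List.mem_singleton] at hh; exact hne_yx hh.symm
        · rw [List.length_append]
          simp only [List.length_singleton]
          omega
        · intro _; rw [vwrite_eval]; simp
      · -- a container cell: only marked visited
        have hr : drainDir H W y x (g, v, acc) d =
            (g, vwrite v (y + d.1) (x + d.2), acc) := by
          dsimp only [drainDir]
          rw [if_pos ⟨h1, h2, h3, h4, hvfalse⟩, if_neg hg0, if_neg hg1]
        rw [hr]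
        dsimp only [DB, QCl]
        refine ⟨⟨hconv, hnd, ?_, hvr', ?_, hvyx', hyx_acc⟩, hvmono, fun a b h => absurd rfl h,
          fun _ _ h => h, ?_, fun p hp => hp, ?_⟩
        · intro p hp
          obtain ⟨hv1, hrest⟩ := hq p hp
          exact ⟨hvmono _ _ hv1, hrest⟩
        · intro z hvz hdom
          rw [vwrite_eval] at hvz
          by_cases hab : z.1 = y + d.1 ∧ z.2 = x + d.2
          · exfalso
            have hdom' : g0 (y + d.1) (x + d.2) = -1 ∨ g0 (y + d.1) (x + d.2) = 0 := by
              rw [hab.1, hab.2] at hdom; exact hdom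
            rcases hconv (y + d.1) (x + d.2) with heq | ⟨hz0, hzneg, _⟩
            · rcases hdom' with hh | hh <;> omega
            · exact hg1 hzneg
          · rw [if_neg hab] at hvz
            obtain ⟨hair1, hneg1, hrest⟩ := hc5 z hvz hdom
            refine ⟨hair1, hneg1, ?_⟩
            rcases hrest with hmem | hnbrs
            · exact Or.inl hmem
            · right
              intro d' hd' hin'
              exact hvmono _ _ (hnbrs d' hd' hin')
        · have := unvis_vwrite H W v (y + d.1) (x + d.2) hnin hvfalse
          omega
        · intro _; rw [vwrite_eval]; simp

theorem drainDirs_spec (H W : Int) (g0 : PvGrid) (y x : Int)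
    (st : PvGrid × PvVis × List (Int × Int))
    (hpin : inRP H W (y, x)) (hpair : AirR H W g0 (y, x))
    (hdb : DB H W g0 y x st) :
    DB H W g0 y x (dirsA.foldl (drainDir H W y x) st) ∧
    (∀ a b, st.2.1 a b = true → (dirsA.foldl (drainDir H W y x) st).2.1 a b = true) ∧
    (∀ a b, (dirsA.foldl (drainDir H W y x) st).1 a b ≠ st.1 a b →
      (dirsA.foldl (drainDir H W y x) st).2.1 a b = true) ∧
    (∀ a b, st.1 a b = -1 → (dirsA.foldl (drainDir H W y x) st).1 a b = -1) ∧
    ((dirsA.foldl (drainDir H W y x) st).2.2.length +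
        unvis H W (dirsA.foldl (drainDir H W y x) st).2.1 ≤
      st.2.2.length + unvis H W st.2.1) ∧
    (∀ p ∈ st.2.2, p ∈ (dirsA.foldl (drainDir H W y x) st).2.2) ∧
    (∀ d ∈ dirsA, inRP H W (y + d.1, x + d.2) →
      (dirsA.foldl (drainDir H W y x) st).2.1 (y + d.1) (x + d.2) = true) := by
  obtain ⟨db1, vm1, cv1, gp1, me1, qa1, nb1⟩ :=
    drainDir_spec H W g0 y x (-1, 0) (by simp [dirsA]) st hpin hpair hdb
  obtain ⟨db2, vm2, cv2, gp2, me2, qa2, nb2⟩ :=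
    drainDir_spec H W g0 y x (1, 0) (by simp [dirsA]) _ hpin hpair db1
  obtain ⟨db3, vm3, cv3, gp3, me3, qa3, nb3⟩ :=
    drainDir_spec H W g0 y x (0, -1) (by simp [dirsA]) _ hpin hpair db2
  obtain ⟨db4, vm4, cv4, gp4, me4, qa4, nb4⟩ :=
    drainDir_spec H W g0 y x (0, 1) (by simp [dirsA]) _ hpin hpair db3
  have hfold : dirsA.foldl (drainDir H W y x) st =
      drainDir H W y x (drainDir H W y x (drainDir H W y x
        (drainDir H W y x st (-1, 0)) (1, 0)) (0, -1)) (0, 1) := by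
    simp [dirsA]
  rw [hfold]
  refine ⟨db4, ?_, ?_, ?_, ?_, ?_, ?_⟩
  · exact fun a b h => vm4 a b (vm3 a b (vm2 a b (vm1 a b h)))
  · intro a b hne
    by_cases h4 : (drainDir H W y x (drainDir H W y x (drainDir H W y x
        (drainDir H W y x st (-1, 0)) (1, 0)) (0, -1)) (0, 1)).1 a b =
        (drainDir H W y x (drainDir H W y x (drainDir H W y x st (-1, 0)) (1, 0)) (0, -1)).1 a b
    · by_cases h3 : (drainDir H W y x (drainDir H W y x (drainDir H W y x st (-1, 0)) (1, 0))
          (0, -1)).1 a b = (drainDir H W y x (drainDir H W y x st (-1, 0)) (1, 0)).1 a b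
      · by_cases h2 : (drainDir H W y x (drainDir H W y x st (-1, 0)) (1, 0)).1 a b =
            (drainDir H W y x st (-1, 0)).1 a b
        · have h1 : (drainDir H W y x st (-1, 0)).1 a b ≠ st.1 a b := by
            intro hh; exact hne (by rw [h4, h3, h2, hh])
          exact vm4 a b (vm3 a b (vm2 a b (cv1 a b h1)))
        · exact vm4 a b (vm3 a b (cv2 a b h2))
      · exact vm4 a b (cv3 a b h3)
    · exact cv4 a b h4
  · exact fun a b h => gp4 a b (gp3 a b (gp2 a b (gp1 a b h)))
  · exact le_trans me4 (le_trans me3 (le_trans me2 me1))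
  · exact fun p hp => qa4 _ (qa3 _ (qa2 _ (qa1 _ hp)))
  · intro d hd hin
    simp only [dirsA, List.mem_cons, List.not_mem_nil, or_false] at hd
    rcases hd with rfl | rfl | rfl | rfl
    · exact vm4 _ _ (vm3 _ _ (vm2 _ _ (nb1 hin)))
    · exact vm4 _ _ (vm3 _ _ (nb2 hin))
    · exact vm4 _ _ (nb3 hin)
    · exact nb4 hin

def WInv (H W : Int) (g0 g : PvGrid) (v : PvVis) (q : List (Int × Int)) : Prop :=
  ConvP H W g0 g ∧ q.Nodup ∧ (∀ p ∈ q, v p.1 p.2 = true ∧ QCl H W g0 g p) ∧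
  (∀ a b, v a b = true → inRP H W (a, b)) ∧ Cl5 H W g0 g v q

theorem drainA_spec (H W : Int) (g0 : PvGrid) :
    ∀ (fuel : Nat) (g : PvGrid) (v : PvVis) (q : List (Int × Int)),
      WInv H W g0 g v q → q.length + unvis H W v ≤ fuel →
      ConvP H W g0 (drainA H W fuel g v q).1 ∧
      Cl5 H W g0 (drainA H W fuel g v q).1 (drainA H W fuel g v q).2 [] ∧
      (∀ a b, v a b = true → (drainA H W fuel g v q).2 a b = true) ∧
      (∀ a b, (drainA H W fuel g v q).1 a b ≠ g a b → (drainA H W fuel g v q).2 a b = true) ∧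
      (∀ a b, g a b = -1 → (drainA H W fuel g v q).1 a b = -1) ∧
      (∀ a b, (drainA H W fuel g v q).2 a b = true → inRP H W (a, b)) := by
  intro fuel
  induction fuel with
  | zero =>
    intro g v q hinv hfuel
    have hq : q = [] := List.length_eq_zero_iff.mp (by omega)
    subst hq
    obtain ⟨hconv, _, _, hvr, hc5⟩ := hinv
    exact ⟨hconv, hc5, fun _ _ h => h, fun a b h => absurd rfl h, fun _ _ h => h, hvr⟩
  | succ f ih =>
    intro g v q hinv hfuel
    match q with
    | [] =>
      obtain ⟨hconv, _, _, hvr, hc5⟩ := hinv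
      exact ⟨hconv, hc5, fun _ _ h => h, fun a b h => absurd rfl h, fun _ _ h => h, hvr⟩
    | (y, x) :: rest =>
      obtain ⟨hconv, hnd, hq, hvr, hc5⟩ := hinv
      obtain ⟨hyx_rest, hndrest⟩ := List.nodup_cons.mp hnd
      obtain ⟨hvyx, hpin, hpair, hgneg⟩ := hq (y, x) List.mem_cons_self
      have hdb : DB H W g0 y x (g, v, rest) :=
        ⟨hconv, hndrest, fun p hp => hq p (List.mem_cons_of_mem _ hp), hvr, hc5, hvyx, hyx_rest⟩
      obtain ⟨⟨hconv', hnd', hq', hvr', hc5', hvyx', hyx'⟩, vm, cv, gp, me, qa, nbs⟩ :=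
        drainDirs_spec H W g0 y x (g, v, rest) hpin hpair hdb
      have hstep : drainA H W (f + 1) g v ((y, x) :: rest) =
          drainA H W f (dirsA.foldl (drainDir H W y x) (g, v, rest)).1
            (dirsA.foldl (drainDir H W y x) (g, v, rest)).2.1
            (dirsA.foldl (drainDir H W y x) (g, v, rest)).2.2 := rfl
      rw [hstep]
      have hinv' : WInv H W g0 (dirsA.foldl (drainDir H W y x) (g, v, rest)).1
          (dirsA.foldl (drainDir H W y x) (g, v, rest)).2.1
          (dirsA.foldl (drainDir H W y x) (g, v, rest)).2.2 := by
        refine ⟨hconv', hnd', hq', hvr', ?_⟩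
        intro z hvz hdom
        obtain ⟨hair1, hneg1, hrest⟩ := hc5' z hvz hdom
        refine ⟨hair1, hneg1, ?_⟩
        rcases hrest with hmem | hnbrs
        · rcases List.mem_cons.mp hmem with hh | hh
          · right
            subst hh
            intro d hd hin
            exact nbs d hd hin
          · exact Or.inl hh
        · exact Or.inr hnbrs
      have hmeas : (dirsA.foldl (drainDir H W y x) (g, v, rest)).2.2.length +
          unvis H W (dirsA.foldl (drainDir H W y x) (g, v, rest)).2.1 ≤ f := by
        have hlen : ((y, x) :: rest).length = rest.length + 1 := rfl
        dsimp only at me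
        omega
      obtain ⟨ic, i5, im, icv, ig, ivr⟩ := ih _ _ _ hinv' hmeas
      refine ⟨ic, i5, ?_, ?_, ?_, ivr⟩
      · exact fun a b h => im a b (vm a b h)
      · intro a b hne
        by_cases heq : (drainA H W f (dirsA.foldl (drainDir H W y x) (g, v, rest)).1
            (dirsA.foldl (drainDir H W y x) (g, v, rest)).2.1
            (dirsA.foldl (drainDir H W y x) (g, v, rest)).2.2).1 a b =
            (dirsA.foldl (drainDir H W y x) (g, v, rest)).1 a b
        · have h1 : (dirsA.foldl (drainDir H W y x) (g, v, rest)).1 a b ≠ g a b := by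
            intro hh; exact hne (by rw [heq, hh])
          exact im a b (cv a b h1)
        · exact icv a b heq
      · exact fun a b h => ig a b (gp a b h)

theorem scan_spec (H W : Int) (hH : 0 ≤ H) (hW : 0 ≤ W) (g0 : PvGrid) :
    ∀ (cells : List (Int × Int)) (g : PvGrid) (v : PvVis),
      (∀ p ∈ cells, inRP H W p) →
      ConvP H W g0 g → Cl5 H W g0 g v [] → (∀ a b, v a b = true → inRP H W (a, b)) →
      ConvP H W g0 (cells.foldl (fun (st : PvGrid × PvVis) p =>
          if st.1 p.1 p.2 = -1 ∧ st.2 p.1 p.2 = false then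
            drainA H W ((H * W).toNat + 1) st.1 (vwrite st.2 p.1 p.2) [p]
          else st) (g, v)).1 ∧
      Cl5 H W g0 (cells.foldl (fun (st : PvGrid × PvVis) p =>
          if st.1 p.1 p.2 = -1 ∧ st.2 p.1 p.2 = false then
            drainA H W ((H * W).toNat + 1) st.1 (vwrite st.2 p.1 p.2) [p]
          else st) (g, v)).1 (cells.foldl (fun (st : PvGrid × PvVis) p =>
          if st.1 p.1 p.2 = -1 ∧ st.2 p.1 p.2 = false then
            drainA H W ((H * W).toNat + 1) st.1 (vwrite st.2 p.1 p.2) [p]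
          else st) (g, v)).2 [] ∧
      (∀ a b, v a b = true → (cells.foldl (fun (st : PvGrid × PvVis) p =>
          if st.1 p.1 p.2 = -1 ∧ st.2 p.1 p.2 = false then
            drainA H W ((H * W).toNat + 1) st.1 (vwrite st.2 p.1 p.2) [p]
          else st) (g, v)).2 a b = true) ∧
      (∀ a b, (cells.foldl (fun (st : PvGrid × PvVis) p =>
          if st.1 p.1 p.2 = -1 ∧ st.2 p.1 p.2 = false then
            drainA H W ((H * W).toNat + 1) st.1 (vwrite st.2 p.1 p.2) [p]
          else st) (g, v)).1 a b ≠ g a b → (cells.foldl (fun (st : PvGrid × PvVis) p =>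
          if st.1 p.1 p.2 = -1 ∧ st.2 p.1 p.2 = false then
            drainA H W ((H * W).toNat + 1) st.1 (vwrite st.2 p.1 p.2) [p]
          else st) (g, v)).2 a b = true) ∧
      (∀ a b, (cells.foldl (fun (st : PvGrid × PvVis) p =>
          if st.1 p.1 p.2 = -1 ∧ st.2 p.1 p.2 = false then
            drainA H W ((H * W).toNat + 1) st.1 (vwrite st.2 p.1 p.2) [p]
          else st) (g, v)).2 a b = true → inRP H W (a, b)) ∧
      (∀ p ∈ cells, (cells.foldl (fun (st : PvGrid × PvVis) p =>
          if st.1 p.1 p.2 = -1 ∧ st.2 p.1 p.2 = false then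
            drainA H W ((H * W).toNat + 1) st.1 (vwrite st.2 p.1 p.2) [p]
          else st) (g, v)).1 p.1 p.2 = -1 → (cells.foldl (fun (st : PvGrid × PvVis) p =>
          if st.1 p.1 p.2 = -1 ∧ st.2 p.1 p.2 = false then
            drainA H W ((H * W).toNat + 1) st.1 (vwrite st.2 p.1 p.2) [p]
          else st) (g, v)).2 p.1 p.2 = true) := by
  intro cells
  induction cells with
  | nil =>
    intro g v _ hconv hc5 hvr
    exact ⟨hconv, hc5, fun _ _ h => h, fun a b h => absurd rfl h, hvr, fun p hp => absurd hp (by simp)⟩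
  | cons p tl ih =>
    intro g v hcin hconv hc5 hvr
    have hpin : inRP H W p := hcin p List.mem_cons_self
    by_cases hseed : g p.1 p.2 = -1 ∧ v p.1 p.2 = false
    · have hstep : (p :: tl).foldl (fun (st : PvGrid × PvVis) p =>
          if st.1 p.1 p.2 = -1 ∧ st.2 p.1 p.2 = false then
            drainA H W ((H * W).toNat + 1) st.1 (vwrite st.2 p.1 p.2) [p]
          else st) (g, v) = tl.foldl (fun (st : PvGrid × PvVis) p =>
          if st.1 p.1 p.2 = -1 ∧ st.2 p.1 p.2 = false then
            drainA H W ((H * W).toNat + 1) st.1 (vwrite st.2 p.1 p.2) [p]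
          else st) (drainA H W ((H * W).toNat + 1) g (vwrite v p.1 p.2) [p]) := by
        rw [List.foldl_cons, if_pos hseed]
      have hairp : AirR H W g0 p := convP_air hconv hpin hseed.1
      have hinv : WInv H W g0 g (vwrite v p.1 p.2) [p] := by
        refine ⟨hconv, List.nodup_singleton _, ?_, ?_, ?_⟩
        · intro q hq
          rw [List.mem_singleton] at hq
          subst hq
          exact ⟨by rw [vwrite_eval]; simp, hpin, hairp, hseed.1⟩
        · intro a b hv
          rw [vwrite_eval] at hv
          by_cases hab : a = p.1 ∧ b = p.2
          · obtain ⟨rfl, rfl⟩ := hab; exact hpin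
          · rw [if_neg hab] at hv; exact hvr a b hv
        · intro z hvz hdom
          rw [vwrite_eval] at hvz
          by_cases hab : z.1 = p.1 ∧ z.2 = p.2
          · have hz : z = p := Prod.ext hab.1 hab.2
            subst hz
            exact ⟨hairp, hseed.1, Or.inl (by simp)⟩
          · rw [if_neg hab] at hvz
            obtain ⟨hair1, hneg1, hrest⟩ := hc5 z hvz hdom
            refine ⟨hair1, hneg1, ?_⟩
            rcases hrest with hmem | hnbrs
            · cases hmem
            · right
              intro d hd hin
              rw [vwrite_eval]
              split <;> [rfl; exact hnbrs d hd hin]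
      have hmeas : ([p] : List (Int × Int)).length + unvis H W (vwrite v p.1 p.2) ≤
          (H * W).toNat + 1 := by
        have h1 : unvis H W (vwrite v p.1 p.2) ≤ unvis H W v :=
          unvis_mono H W _ _ (fun a b hv => by rw [vwrite_eval]; split <;> [rfl; exact hv])
        have h2 : unvis H W v ≤ (H * W).toNat := unvis_le H W hH hW v
        simp only [List.length_singleton]
        omega
      obtain ⟨dc, d5, dm, dcv, dg, dvr⟩ :=
        drainA_spec H W g0 ((H * W).toNat + 1) g (vwrite v p.1 p.2) [p] hinv hmeas
      obtain ⟨ic, i5, im, icv, ivr, ihd⟩ :=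
        ih (drainA H W ((H * W).toNat + 1) g (vwrite v p.1 p.2) [p]).1
          (drainA H W ((H * W).toNat + 1) g (vwrite v p.1 p.2) [p]).2
          (fun q hq => hcin q (List.mem_cons_of_mem _ hq)) dc d5 dvr
      rw [hstep]
      refine ⟨ic, i5, ?_, ?_, ivr, ?_⟩
      · exact fun a b h => im a b (dm a b (by rw [vwrite_eval]; split <;> [rfl; exact h]))
      · intro a b hne
        by_cases heq : (tl.foldl (fun (st : PvGrid × PvVis) p =>
            if st.1 p.1 p.2 = -1 ∧ st.2 p.1 p.2 = false then
              drainA H W ((H * W).toNat + 1) st.1 (vwrite st.2 p.1 p.2) [p]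
            else st) (drainA H W ((H * W).toNat + 1) g (vwrite v p.1 p.2) [p])).1 a b =
            (drainA H W ((H * W).toNat + 1) g (vwrite v p.1 p.2) [p]).1 a b
        · have h1 : (drainA H W ((H * W).toNat + 1) g (vwrite v p.1 p.2) [p]).1 a b ≠ g a b := by
            intro hh; exact hne (by rw [heq, hh])
          exact im a b (dcv a b h1)
        · exact icv a b heq
      · intro q hq
        rcases List.mem_cons.mp hq with rfl | hqtl
        · intro _
          exact im q.1 q.2 (dm q.1 q.2 (by rw [vwrite_eval]; simp))
        · exact ihd q hqtl
    · have hstep : (p :: tl).foldl (fun (st : PvGrid × PvVis) p =>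
          if st.1 p.1 p.2 = -1 ∧ st.2 p.1 p.2 = false then
            drainA H W ((H * W).toNat + 1) st.1 (vwrite st.2 p.1 p.2) [p]
          else st) (g, v) = tl.foldl (fun (st : PvGrid × PvVis) p =>
          if st.1 p.1 p.2 = -1 ∧ st.2 p.1 p.2 = false then
            drainA H W ((H * W).toNat + 1) st.1 (vwrite st.2 p.1 p.2) [p]
          else st) (g, v) := by
        rw [List.foldl_cons, if_neg hseed]
      obtain ⟨ic, i5, im, icv, ivr, ihd⟩ :=
        ih g v (fun q hq => hcin q (List.mem_cons_of_mem _ hq)) hconv hc5 hvr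
      rw [hstep]
      refine ⟨ic, i5, im, icv, ivr, ?_⟩
      intro q hq
      rcases List.mem_cons.mp hq with rfl | hqtl
      · intro hneg
        by_cases hv : v q.1 q.2 = true
        · exact im q.1 q.2 hv
        · have hvfalse : v q.1 q.2 = false := by
            cases hval : v q.1 q.2 <;> [rfl; exact absurd hval hv]
          have hgq : g q.1 q.2 ≠ -1 := fun hh => hseed ⟨hh, hvfalse⟩
          exact icv q.1 q.2 (by rw [hneg]; exact fun hh => hgq hh.symm)
      · exact ihd q hqtl

theorem bfsA_spec (H W : Int) (hH : 0 ≤ H) (hW : 0 ≤ W) (g0 : PvGrid) :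
    SpreadEq H W g0 (bfsA H W g0) := by
  have hbfs : bfsA H W g0 = ((rowMajor 0 H 0 W).foldl (fun (st : PvGrid × PvVis) p =>
      if st.1 p.1 p.2 = -1 ∧ st.2 p.1 p.2 = false then
        drainA H W ((H * W).toNat + 1) st.1 (vwrite st.2 p.1 p.2) [p]
      else st) (g0, fun _ _ => false)).1 := rfl
  obtain ⟨hconv, hc5, hm, hcv, hvr, hcells⟩ :=
    scan_spec H W hH hW g0 (rowMajor 0 H 0 W) g0 (fun _ _ => false)
      (fun p hp => by
        obtain ⟨h1, h2⟩ := mem_rowMajor.mp hp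
        exact ⟨h1.1, h1.2, h2.1, h2.2⟩)
      convP_refl
      (fun z hvz _ => by cases hvz)
      (fun a b hv => by cases hv)
  have hAll : ∀ p, AirR H W g0 p → (bfsA H W g0) p.1 p.2 = -1 := by
    intro p h
    induction h with
    | base q hin hval => rw [hbfs]; exact convP_neg hconv hval
    | step p q hp hadj hin h0 ihh =>
      have hpin : inRP H W p := AirR_inR hp
      have hpmem : p ∈ rowMajor 0 H 0 W :=
        mem_rowMajor.mpr ⟨⟨hpin.1, hpin.2.1⟩, hpin.2.2.1, hpin.2.2.2⟩
      rw [hbfs] at ihh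
      have hpv := hcells p hpmem ihh
      have hdomp : g0 p.1 p.2 = -1 ∨ g0 p.1 p.2 = 0 := AirR_val hp
      obtain ⟨_, _, hrest⟩ := hc5 p hpv hdomp
      rcases hrest with hmem | hnbrs
      · cases hmem
      · obtain ⟨d, hd, rfl⟩ := adjP_iff.mp hadj
        have hqv := hnbrs d hd hin
        obtain ⟨_, hqneg, _⟩ := hc5 (p.1 + d.1, p.2 + d.2) hqv (Or.inr h0)
        rw [hbfs]
        exact hqneg
  intro a b
  constructor
  · rintro ⟨h0, hair⟩
    exact hAll (a, b) hair
  · intro hnot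
    rw [hbfs]
    rcases hconv a b with heq | ⟨h1, _, h3⟩
    · exact heq
    · exact absurd ⟨h1, h3⟩ hnot

-- --- the initial grid has no removed (0) cells on the ASCII domain ---

theorem mkGrid_ne_zero (storage requests : List String) (hDom : Dom_solution storage requests) :
    ∀ a b : Int, mkGrid storage a b ≠ 0 := by
  intro i j
  unfold mkGrid
  dsimp only
  split_ifs with h1 h2 h3 h4 h5
  · decide
  · decide
  · decide
  · -- a character cell
    intro hc
    set cs := (storage.getD (i - 1).toNat "").toList with hcs
    have hlen : 0 < cs.length := by omega
    have hidx : (storage.getD (i - 1).toNat "") ∈ storage ∨ cs = [] := by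
      by_cases hi : (i - 1).toNat < storage.length
      · left
        rw [List.getD_eq_getElem storage "" hi]
        exact List.getElem_mem hi
      · right
        rw [hcs, List.getD_eq_default storage "" (by omega)]
        rfl
    rcases hidx with hmem | hnil
    · have hjlt : (j - 1).toNat < cs.length := by omega
      have hcmem : cs.getD (j - 1).toNat ' ' ∈ cs := by
        rw [List.getD_eq_getElem cs ' ' hjlt]
        exact List.getElem_mem hjlt
      have hdom : pvDomStr (storage.getD (i - 1).toNat "") = true := by
        unfold Dom_solution at hDom
        simp only [Bool.and_eq_true, List.all_eq_true] at hDom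
        exact hDom.1 _ hmem
      have hchar : pvDomChar (cs.getD (j - 1).toNat ' ') = true := by
        unfold pvDomStr at hdom
        rw [List.all_eq_true] at hdom
        exact hdom _ hcmem
      unfold pvDomChar at hchar
      simp only [Bool.or_eq_true, Bool.and_eq_true, decide_eq_true_eq, beq_iff_eq] at hchar
      have hge : 9 ≤ (cs.getD (j - 1).toNat ' ').toNat := by omega
      omega
    · rw [hnil] at hlen
      simp at hlen
  · decide
  · decide

-- --- reading back a materialized grid ---

theorem tabG_row {H W : Int} (g : PvGrid) {i : Nat} (hi : i < H.toNat) :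
    (tabG H W g).getD i [] = (List.range W.toNat).map (fun j => g (Int.ofNat i) (Int.ofNat j)) := by
  unfold tabG
  rw [List.getD_eq_getElem _ _ (by rw [List.length_map, List.length_range]; exact hi)]
  rw [List.getElem_map, List.getElem_range]

theorem readG_tabG {H W : Int} {g : PvGrid} {a b : Int} {v : Int} (hv : v ≠ -2)
    (h : readG (tabG H W g) a b = v) :
    ((a.toNat : Int)) < H ∧ ((b.toNat : Int)) < W ∧ g ((a.toNat : Int)) ((b.toNat : Int)) = v := by
  unfold readG at h
  by_cases ha : a.toNat < H.toNat
  · rw [tabG_row g ha] at h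
    by_cases hb : b.toNat < W.toNat
    · rw [List.getD_eq_getElem _ _ (by rw [List.length_map, List.length_range]; exact hb),
        List.getElem_map, List.getElem_range] at h
      exact ⟨by omega, by omega, h⟩
    · rw [List.getD_eq_default _ _ (by rw [List.length_map, List.length_range]; omega)] at h
      exact absurd h.symm hv
  · have hrow : (tabG H W g).getD a.toNat [] = [] := by
      apply List.getD_eq_default
      have hl : (tabG H W g).length = H.toNat := by
        unfold tabG; rw [List.length_map, List.length_range]
      omega
    rw [hrow] at h
    have hnil : (([] : List Int)).getD b.toNat (-2) = -2 := by simp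
    rw [hnil] at h
    exact absurd h.symm hv

-- zeros of a table stay interior (the invariant carried between requests)
def HzT (n m : Int) (t : List (List Int)) : Prop :=
  ∀ a b, readG t a b = 0 → 1 ≤ a ∧ a < n + 1 ∧ 1 ≤ b ∧ b < m + 1

theorem hzT_tabG {n m : Int} {g : PvGrid}
    (hg : ∀ a b, g a b = 0 → 1 ≤ a ∧ a < n + 1 ∧ 1 ≤ b ∧ b < m + 1) :
    HzT n m (tabG (n+2) (m+2) g) := by
  intro a b h
  obtain ⟨h1, h2, h3⟩ := readG_tabG (by decide) h
  have := hg _ _ h3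
  omega

-- --- one request: A's step equals B's step, and removed cells stay interior ---

theorem stepAB_eq (n m : Int) (hn : 0 ≤ n) (hm : 0 ≤ m) (t : List (List Int)) (k : Int)
    (hz : HzT n m t) (req : String) :
    stepA n m (t, k) req = stepB n m (t, k) req ∧
    HzT n m (stepB n m (t, k) req).1 := by
  cases hreq : req.toList with
  | nil =>
    constructor
    · simp only [stepA, stepB, hreq]
    · simp only [stepB, hreq]
      exact hz
  | cons c rest =>
    have hch : ((c.toNat : Int)) ≠ -1 := by
      have := Int.natCast_nonneg c.toNat; omega
    have hzf : ∀ a b, readG t a b = 0 → 1 ≤ a ∧ a < n + 1 ∧ 1 ≤ b ∧ b < m + 1 := hz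
    by_cases hfork : rest = []
    · -- forklift request
      simp only [stepA, stepB, hreq, hfork, if_pos]
      set L := (rowMajor 1 (n+1) 1 (m+1)).filter
        (fun p => readG t p.1 p.2 == (c.toNat : Int) && isAirB (readG t) p.1 p.2) with hL
      have hfold := fork_fold (c.toNat : Int) hch (readG t) (rowMajor 1 (n+1) 1 (m+1)) (readG t) k
        nodup_rowMajor (fun p _ => rfl) (fun a b => Iff.rfl)
      rw [hfold]
      have hz1 : ∀ a b, overrideB L 0 (readG t) a b = 0 →
          1 ≤ a ∧ a < n + 1 ∧ 1 ≤ b ∧ b < m + 1 := by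
        intro a b hv
        by_cases hmem : ((a, b) : Int × Int) ∈ L
        · have := List.mem_filter.mp (hL ▸ hmem)
          obtain ⟨hh1, hh2⟩ := mem_rowMajor.mp this.1
          exact ⟨hh1.1, hh1.2, hh2.1, hh2.2⟩
        · rw [show overrideB L 0 (readG t) a b = readG t a b by simp [overrideB, hmem]] at hv
          exact hzf a b hv
      have hgrid : bfsA (n+2) (m+2) (overrideB L 0 (readG t)) =
          spreadB n m ((n * m).toNat + 1) (overrideB L 0 (readG t)) :=
        spreadEq_unique (n+2) (m+2) (overrideB L 0 (readG t)) _ _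
          (bfsA_spec (n+2) (m+2) (by omega) (by omega) _)
          (spreadB_spec n m hn hm _ hz1)
      have hz2 : ∀ a b, spreadB n m ((n * m).toNat + 1) (overrideB L 0 (readG t)) a b = 0 →
          1 ≤ a ∧ a < n + 1 ∧ 1 ≤ b ∧ b < m + 1 := by
        intro a b hv
        have hspec := spreadB_spec n m hn hm (overrideB L 0 (readG t)) hz1 a b
        by_cases hcase : overrideB L 0 (readG t) a b = 0 ∧
            AirR (n+2) (m+2) (overrideB L 0 (readG t)) (a, b)
        · rw [hspec.1 hcase] at hv; cases hv
        · rw [hspec.2 hcase] at hv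
          exact hz1 a b hv
      exact ⟨Prod.ext (by rw [hgrid]) rfl, hzT_tabG hz2⟩
    · -- crane request
      simp only [stepA, stepB, hreq, hfork, if_false]
      set L := (rowMajor 1 (n+1) 1 (m+1)).filter
        (fun p => readG t p.1 p.2 == (c.toNat : Int)) with hL
      have hfold := crane_fold (c.toNat : Int) hch (readG t) (rowMajor 1 (n+1) 1 (m+1)) (readG t) k
        nodup_rowMajor (fun p _ => rfl)
      rw [hfold]
      have hz1 : ∀ a b, overrideB L 0 (readG t) a b = 0 →
          1 ≤ a ∧ a < n + 1 ∧ 1 ≤ b ∧ b < m + 1 := by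
        intro a b hv
        by_cases hmem : ((a, b) : Int × Int) ∈ L
        · have := List.mem_filter.mp (hL ▸ hmem)
          obtain ⟨hh1, hh2⟩ := mem_rowMajor.mp this.1
          exact ⟨hh1.1, hh1.2, hh2.1, hh2.2⟩
        · rw [show overrideB L 0 (readG t) a b = readG t a b by simp [overrideB, hmem]] at hv
          exact hzf a b hv
      have hgrid : bfsA (n+2) (m+2) (overrideB L 0 (readG t)) =
          spreadB n m ((n * m).toNat + 1) (overrideB L 0 (readG t)) :=
        spreadEq_unique (n+2) (m+2) (overrideB L 0 (readG t)) _ _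
          (bfsA_spec (n+2) (m+2) (by omega) (by omega) _)
          (spreadB_spec n m hn hm _ hz1)
      have hz2 : ∀ a b, spreadB n m ((n * m).toNat + 1) (overrideB L 0 (readG t)) a b = 0 →
          1 ≤ a ∧ a < n + 1 ∧ 1 ≤ b ∧ b < m + 1 := by
        intro a b hv
        have hspec := spreadB_spec n m hn hm (overrideB L 0 (readG t)) hz1 a b
        by_cases hcase : overrideB L 0 (readG t) a b = 0 ∧
            AirR (n+2) (m+2) (overrideB L 0 (readG t)) (a, b)
        · rw [hspec.1 hcase] at hv; cases hv
        · rw [hspec.2 hcase] at hv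
          exact hz1 a b hv
      exact ⟨Prod.ext (by rw [hgrid]) rfl, hzT_tabG hz2⟩

theorem foldAB_eq (n m : Int) (hn : 0 ≤ n) (hm : 0 ≤ m) :
    ∀ (reqs : List String) (t : List (List Int)) (k : Int),
      HzT n m t →
      reqs.foldl (stepA n m) (t, k) = reqs.foldl (stepB n m) (t, k) := by
  intro reqs
  induction reqs with
  | nil => intro t k _; rfl
  | cons r tl ih =>
    intro t k hz
    obtain ⟨heq, hz'⟩ := stepAB_eq n m hn hm t k hz r
    rw [List.foldl_cons, List.foldl_cons, heq]
    have := ih (stepB n m (t, k) r).1 (stepB n m (t, k) r).2 hz'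
    simpa using this

-- ===== VERDICT (by name: the statement is the Claim_ definition above) =====
theorem solution_spec : Claim_equal_solution := by
  intro storage requests hDom _hPre
  unfold Spec_solution solution solution_alt
  dsimp only
  have hn : 0 ≤ (storage.length : Int) := Int.natCast_nonneg _
  have hm : 0 ≤ (((storage.headD "").length : Nat) : Int) := Int.natCast_nonneg _
  have hz0 : HzT (storage.length : Int) (((storage.headD "").length : Nat) : Int)
      (tabG ((storage.length : Int) + 2) ((((storage.headD "").length : Nat) : Int) + 2)
        (mkGrid storage)) :=
    hzT_tabG (fun a b h => absurd h (mkGrid_ne_zero storage requests hDom a b))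
  rw [foldAB_eq _ _ hn hm requests _ _ hz0]
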